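-- pv_equiv track=rewrite | github.com/hoangdat2407/Junior-year-first-semester | mm&attt/util.py | name_encrypt
-- ===== SOURCE A (Python) =====
-- def name_encrypt(name: str, k: int = 27) -> int:
--     if k < 27:
--         k += 26
--     name = name.upper()
--     m = 0
--     for char in name:
--         if 'A' <= char <= 'Z':
--             m = m * k + (ord(char) - ord('A') + 1)  # A=1..Z=26
--     return m
-- ===== SOURCE B (Python) =====
-- def name_encrypt(name: str, k: int = 27) -> int:
--     if k < 27:
--         k += 26
--     vals = [ord(c) - ord('A') + 1 for c in name.upper() if 'A' <= c <= 'Z']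
--     s = 0
--     p = 1
--     for v in reversed(vals):
--         s += v * p
--         p *= k
--     return s
-- ===== Notes on version B (the rewrite author's own statement) =====
-- stated objective: alternative
-- what changed: Replaces the single-pass Horner accumulator m=m*k+v with a two-phase computation: first extract the list of letter values, then sum v*p over the reversed list maintaining an explicit positional power p.
import Mathlib
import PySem

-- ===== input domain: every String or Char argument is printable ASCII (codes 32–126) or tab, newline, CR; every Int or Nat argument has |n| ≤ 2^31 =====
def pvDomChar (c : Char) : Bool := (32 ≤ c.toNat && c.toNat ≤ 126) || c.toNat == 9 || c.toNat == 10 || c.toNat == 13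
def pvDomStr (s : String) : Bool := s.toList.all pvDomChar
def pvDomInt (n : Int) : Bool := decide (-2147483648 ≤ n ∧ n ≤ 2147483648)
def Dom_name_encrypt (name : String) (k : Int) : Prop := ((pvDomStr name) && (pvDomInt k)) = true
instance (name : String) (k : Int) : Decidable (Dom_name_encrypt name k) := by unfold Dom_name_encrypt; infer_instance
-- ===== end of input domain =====

-- B replaces A's single Horner accumulator with a letter-value list summed with explicit positional powers (alternative decomposition, same cost).

-- ===== PORT A =====
-- A: Horner's accumulator m = m*k + v over the upper-cased letters, in one pass.
def name_encrypt (name : String) (k : Int) : Int :=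
  let k := if k < 27 then k + 26 else k
  let name := PySem.Str.upper name
  name.toList.foldl
    (fun m c => if 'A' ≤ c ∧ c ≤ 'Z' then m * k + ((c.toNat : Int) - 65 + 1) else m) 0

-- ===== PORT B =====
-- B: first the list of letter values, then a reversed pass maintaining (sum, power).
def name_encrypt_alt (name : String) (k : Int) : Int :=
  let k := if k < 27 then k + 26 else k
  let vals := ((PySem.Str.upper name).toList.filter
      (fun c => decide ('A' ≤ c) && decide (c ≤ 'Z'))).map (fun c => (c.toNat : Int) - 65 + 1)
  (vals.reverse.foldl (fun (sp : Int × Int) v => (sp.1 + v * sp.2, sp.2 * k)) (0, 1)).1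

-- ===== PRECONDITION & SPEC =====
def Spec_name_encrypt (name : String) (k : Int) (out : Int) : Prop := out = name_encrypt_alt name k
instance (name : String) (k : Int) (out : Int) : Decidable (Spec_name_encrypt name k out) := by unfold Spec_name_encrypt; infer_instance

-- ===== CLAIM (what is proved, stated in full; the proofs are below) =====
def Claim_equal_name_encrypt : Prop := ∀ (name : String) (k : Int), Dom_name_encrypt name k → Spec_name_encrypt name k (name_encrypt name k)

-- ===== LEMMAS AND PROOFS =====

-- A's conditional fold over the characters equals the Horner fold over B's value list.
theorem cond_fold_eq_horner (k : Int) (cs : List Char) : ∀ (m : Int),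
    cs.foldl (fun m c => if 'A' ≤ c ∧ c ≤ 'Z' then m * k + ((c.toNat : Int) - 65 + 1) else m) m
      = ((cs.filter (fun c => decide ('A' ≤ c) && decide (c ≤ 'Z'))).map
          (fun c => (c.toNat : Int) - 65 + 1)).foldl (fun m v => m * k + v) m := by
  induction cs with
  | nil => intro m; simp
  | cons c t ih =>
    intro m
    by_cases h : 'A' ≤ c ∧ c ≤ 'Z'
    · simp [List.filter, h.1, h.2, ih]
    · have : (decide ('A' ≤ c) && decide (c ≤ 'Z')) = false := by
        simp only [Bool.and_eq_false_iff, decide_eq_false_iff_not]; tauto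
      simp [List.filter, this, h, ih]

-- The power component of B's fold.
theorem fold_snd (k : Int) (l : List Int) : ∀ (s p : Int),
    (l.foldl (fun (sp : Int × Int) v => (sp.1 + v * sp.2, sp.2 * k)) (s, p)).2
      = p * k ^ l.length := by
  induction l with
  | nil => intro s p; simp
  | cons v t ih => intro s p; simp [ih, pow_succ]; ring

-- Horner's fold equals the reversed positional-power fold.
theorem horner_eq_positional (k : Int) (l : List Int) : ∀ (m : Int),
    l.foldl (fun m v => m * k + v) m
      = m * k ^ l.length
        + (l.reverse.foldl (fun (sp : Int × Int) v => (sp.1 + v * sp.2, sp.2 * k)) (0, 1)).1 := by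
  induction l with
  | nil => intro m; simp
  | cons v t ih =>
    intro m
    have hsnd := fold_snd k t.reverse 0 1
    simp only [List.foldl_cons, List.reverse_cons, List.foldl_append, List.foldl_cons,
      List.foldl_nil, List.length_cons, ih]
    rw [hsnd]
    simp [pow_succ]
    ring

-- ===== VERDICT (by name: the statement is the Claim_ definition above) =====
theorem name_encrypt_spec : Claim_equal_name_encrypt := by
  intro name k _
  unfold Spec_name_encrypt name_encrypt name_encrypt_alt
  simp only []
  rw [cond_fold_eq_horner, horner_eq_positional]
  simp
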